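-- pv_equiv track=rewrite | github.com/aflatoune/Huawei | submissions/prepare_rf/feature_extractor.py | _get_add_unit
-- ===== SOURCE A (Python) =====
-- def _get_add_unit(add_unit):
--     params = {"day": False,
--               'hour': False,
--               'minute': False}
--
--     for i in add_unit:
--         if i in params:
--             params[i] = True
--     return params
-- ===== SOURCE B (Python) =====
-- def _get_add_unit(add_unit):
--     seen = set(add_unit)
--     return {k: k in seen for k in ("day", "hour", "minute")}
-- ===== Notes on version B (the rewrite author's own statement) =====
-- stated objective: idiomatic
-- what changed: Replaces the in-place flag-mutating loop over the input with building a set of the input once and a dict comprehension over the three fixed keys.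
import Mathlib
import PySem

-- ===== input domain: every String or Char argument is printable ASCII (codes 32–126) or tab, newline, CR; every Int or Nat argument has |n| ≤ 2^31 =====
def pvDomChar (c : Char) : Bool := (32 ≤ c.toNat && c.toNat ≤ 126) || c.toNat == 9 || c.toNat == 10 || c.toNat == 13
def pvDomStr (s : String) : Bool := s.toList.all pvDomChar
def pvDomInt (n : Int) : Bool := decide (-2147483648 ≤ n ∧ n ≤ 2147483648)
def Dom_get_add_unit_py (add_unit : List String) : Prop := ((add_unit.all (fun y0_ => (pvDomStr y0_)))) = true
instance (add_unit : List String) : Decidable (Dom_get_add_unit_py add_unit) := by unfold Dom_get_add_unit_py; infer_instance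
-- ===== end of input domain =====

-- B builds set(add_unit) once and maps over the three fixed keys instead of A's in-place flag-writing loop (idiomatic decomposition).

-- ===== PORT A =====
def get_add_unit_py (add_unit : List String) : List (String × Bool) :=
  let params : PySem.Dict String Bool :=
    PySem.Dict.ofList [("day", false), ("hour", false), ("minute", false)]
  (add_unit.foldl (fun params i =>
      if params.contains i then params.insert i true else params) params).items

-- ===== PORT B =====
def get_add_unit_py_alt (add_unit : List String) : List (String × Bool) :=
  let seen : PySem.Set String := PySem.Set.ofList add_unit
  ["day", "hour", "minute"].map (fun k => (k, PySem.Set.contains seen k))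

-- ===== PRECONDITION & SPEC =====
def Spec_get_add_unit_py (add_unit : List String) (out : List (String × Bool)) : Prop := out = get_add_unit_py_alt add_unit
instance (add_unit : List String) (out : List (String × Bool)) : Decidable (Spec_get_add_unit_py add_unit out) := by unfold Spec_get_add_unit_py; infer_instance

-- ===== CLAIM (what is proved, stated in full; the proofs are below) =====
def Claim_equal_get_add_unit_py : Prop := ∀ (add_unit : List String), Dom_get_add_unit_py add_unit → Spec_get_add_unit_py add_unit (get_add_unit_py add_unit)

-- ===== LEMMAS AND PROOFS =====

-- one loop step on the three-key dict: a known key sets its flag, an unknown key leaves the dict unchanged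
lemma step_day (a b c : Bool) :
    (if (PySem.Dict.mk [("day", a), ("hour", b), ("minute", c)] : PySem.Dict String Bool).contains "day"
      then (PySem.Dict.mk [("day", a), ("hour", b), ("minute", c)] : PySem.Dict String Bool).insert "day" true
      else PySem.Dict.mk [("day", a), ("hour", b), ("minute", c)])
    = PySem.Dict.mk [("day", true), ("hour", b), ("minute", c)] := by
  simp [PySem.Dict.insert, PySem.Dict.contains]

lemma step_hour (a b c : Bool) :
    (if (PySem.Dict.mk [("day", a), ("hour", b), ("minute", c)] : PySem.Dict String Bool).contains "hour"
      then (PySem.Dict.mk [("day", a), ("hour", b), ("minute", c)] : PySem.Dict String Bool).insert "hour" true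
      else PySem.Dict.mk [("day", a), ("hour", b), ("minute", c)])
    = PySem.Dict.mk [("day", a), ("hour", true), ("minute", c)] := by
  simp [PySem.Dict.insert, PySem.Dict.contains]

lemma step_minute (a b c : Bool) :
    (if (PySem.Dict.mk [("day", a), ("hour", b), ("minute", c)] : PySem.Dict String Bool).contains "minute"
      then (PySem.Dict.mk [("day", a), ("hour", b), ("minute", c)] : PySem.Dict String Bool).insert "minute" true
      else PySem.Dict.mk [("day", a), ("hour", b), ("minute", c)])
    = PySem.Dict.mk [("day", a), ("hour", b), ("minute", true)] := by
  simp [PySem.Dict.insert, PySem.Dict.contains]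

lemma step_other (a b c : Bool) (i : String)
    (hd : ¬i = "day") (hh : ¬i = "hour") (hm : ¬i = "minute") :
    (if (PySem.Dict.mk [("day", a), ("hour", b), ("minute", c)] : PySem.Dict String Bool).contains i
      then (PySem.Dict.mk [("day", a), ("hour", b), ("minute", c)] : PySem.Dict String Bool).insert i true
      else PySem.Dict.mk [("day", a), ("hour", b), ("minute", c)])
    = PySem.Dict.mk [("day", a), ("hour", b), ("minute", c)] := by
  simp [PySem.Dict.contains, Ne.symm hd, Ne.symm hh, Ne.symm hm]

-- the loop's invariant: folding over l on the three-key dict ORs membership of l into each flag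
lemma fold_items_eq (l : List String) (a b c : Bool) :
    (l.foldl (fun params i =>
        if PySem.Dict.contains params i then params.insert i true else params)
      (PySem.Dict.mk [("day", a), ("hour", b), ("minute", c)])).items
    = [("day", a || l.contains "day"), ("hour", b || l.contains "hour"),
       ("minute", c || l.contains "minute")] := by
  induction l generalizing a b c with
  | nil => simp
  | cons i t ih =>
    by_cases hd : i = "day"
    · subst hd
      rw [List.foldl_cons, step_day, ih]
      simp
    · by_cases hh : i = "hour"
      · subst hh
        rw [List.foldl_cons, step_hour, ih]
        simp
      · by_cases hm : i = "minute"
        · subst hm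
          rw [List.foldl_cons, step_minute, ih]
          simp
        · rw [List.foldl_cons, step_other a b c i hd hh hm, ih]
          simp [Ne.symm hd, Ne.symm hh, Ne.symm hm]

-- ===== VERDICT (by name: the statement is the Claim_ definition above) =====
theorem get_add_unit_py_spec : Claim_equal_get_add_unit_py := by
  intro add_unit _
  show get_add_unit_py add_unit = get_add_unit_py_alt add_unit
  have hof : PySem.Dict.ofList [("day", false), ("hour", false), ("minute", false)]
      = PySem.Dict.mk [("day", false), ("hour", false), ("minute", false)] := by decide
  simp only [get_add_unit_py, get_add_unit_py_alt, hof, List.map]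
  rw [fold_items_eq]
  simp
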